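-- pv_equiv track=rewrite | github.com/jse8406/Baekjoon_practice | coding_bootcamp/PCCE_10.py | solution
-- ===== SOURCE A (Python) =====
-- def solution(mats, park):
--     mats.sort(reverse = True)
--     width = len(park[0])  # 8
--     height = len(park)  # 6
--     answer = 0
--     mats_count = len(mats)
--     for i in range(height):
--         for j in range(width):
--             if park[i][j] == "-1":
--                 for index in range(mats_count):
--                     error = 0
--                     length = mats[index]
--                     if length + i <= height and length + j <= width: # index 에러 안나는지 체크
--                         for h in range(length):
--                             for w in range(length):
--                                 if park[i+h][j+w] != "-1":
--                                     error += 1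
--                         if error == 0:
--                             answer = max(length, answer)
--     if answer == 0:
--         return -1
--     else:
--         return answer
-- ===== SOURCE B (Python) =====
-- # Re-implementation: collect the in-range mat sizes once, binary-search the largest
-- # all-empty square side (the "fits" predicate is monotone in the side) over anchors drawn
-- # from a precomputed list of empty cells, and return the largest mat size not exceeding it
-- # — instead of re-testing every mat at every empty cell.  Note: A sorts `mats` in place;
-- # B does not mutate its arguments (the equivalence claimed is about the return value only).
-- def solution(mats, park):
--     height = len(park)
--     width = len(park[0])
--     cands = [m for m in mats if 1 <= m <= min(height, width)]
--     if not cands: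
--         return -1
--     empties = [(i, j) for i, row in enumerate(park) for j, v in enumerate(row[:width]) if v == "-1"]
--
--     def fits(s):
--         # is some s x s block of cells entirely "-1"?  (its top-left corner is empty)
--         return any(
--             i + s <= height and j + s <= width
--             and all(park[i + h][j + w] == "-1" for h in range(s) for w in range(s))
--             for (i, j) in empties
--         )
--
--     lo, hi = 0, max(cands)
--     while lo < hi:
--         mid = (lo + hi + 1) // 2
--         if fits(mid):
--             lo = mid
--         else:
--             hi = mid - 1
--     return max((m for m in cands if m <= lo), default=-1)
-- ===== Notes on version B (the rewrite author's own statement) =====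
-- stated objective: faster
-- what changed: Instead of testing every mat at every empty cell and folding a running max, B picks the largest in-range mat size, binary-searches the largest all-empty square side (the fits predicate is monotone in the side) and returns the largest mat size not exceeding it; B does not mutate `mats` (A sorts it in place), the equivalence is about the return value.
import Mathlib
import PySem

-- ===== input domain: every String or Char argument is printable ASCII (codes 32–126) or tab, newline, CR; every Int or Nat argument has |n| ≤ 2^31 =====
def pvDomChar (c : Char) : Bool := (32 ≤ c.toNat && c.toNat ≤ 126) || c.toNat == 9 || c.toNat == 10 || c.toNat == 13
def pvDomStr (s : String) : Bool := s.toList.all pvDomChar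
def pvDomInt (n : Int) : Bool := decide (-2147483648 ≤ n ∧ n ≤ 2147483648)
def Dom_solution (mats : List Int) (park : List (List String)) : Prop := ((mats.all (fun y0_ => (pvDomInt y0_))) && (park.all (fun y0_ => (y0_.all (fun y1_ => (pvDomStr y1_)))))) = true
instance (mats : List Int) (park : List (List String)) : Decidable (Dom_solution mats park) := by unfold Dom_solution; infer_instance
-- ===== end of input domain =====

-- B takes the largest in-range mat size, binary-searches the largest all-empty square side
-- (a monotone predicate, tested at anchors from a precomputed list of empty cells) and
-- returns the largest mat size not exceeding it, instead of re-testing every mat at every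
-- empty cell.
-- Python A sorts `mats` in place; B does not mutate its arguments — the equivalence proved
-- here is about the return value only.

-- ===== PORT A =====
def solution (mats : List Int) (park : List (List String)) : Int :=
  let matsS := PySem.List.sorted mats id true
  let width : Int := PySem.List.len (PySem.List.pyGetD park 0 [])
  let height : Int := PySem.List.len park
  let answer : Int :=
    (PySem.List.pyRange 0 height 1).foldl (fun answer i =>
      (PySem.List.pyRange 0 width 1).foldl (fun answer j =>
        if PySem.List.pyGetD (PySem.List.pyGetD park i []) j "" = "-1" then
          matsS.foldl (fun answer length =>
            if length + i ≤ height ∧ length + j ≤ width then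
              let error : Int :=
                (PySem.List.pyRange 0 length 1).foldl (fun error h =>
                  (PySem.List.pyRange 0 length 1).foldl (fun error w =>
                    if PySem.List.pyGetD (PySem.List.pyGetD park (i + h) []) (j + w) "" ≠ "-1"
                    then error + 1 else error) error) 0
              if error = 0 then max length answer else answer
            else answer) answer
        else answer) answer) 0
  if answer = 0 then -1 else answer

-- ===== PORT B =====
-- the empty cells of the park (the list comprehension `empties`)
def emptiesAlt (park : List (List String)) (wid : Nat) : List (Int × Int) :=
  (PySem.List.enumerate park).flatMap fun iv =>
    ((PySem.List.enumerate (PySem.List.slice iv.2 none (some (wid : Int)))).filter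
      (fun jv => jv.2 == "-1")).map fun jv => (iv.1, jv.1)

-- is some s x s block of cells entirely "-1"?  (its top-left corner is empty)
def fitsAlt (park : List (List String)) (hgt wid : Nat) (empties : List (Int × Int))
    (s : Nat) : Bool :=
  empties.any fun p =>
    decide (p.1 + (s : Int) ≤ (hgt : Int)) && decide (p.2 + (s : Int) ≤ (wid : Int)) &&
    ((List.range s).all fun h =>
      (List.range s).all fun w =>
        PySem.List.pyGetD (PySem.List.pyGetD park (p.1 + (h : Int)) []) (p.2 + (w : Int)) "" == "-1")

-- the while-loop: binary search for the largest side with fitsAlt.  Structural recursion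
-- on a fuel that bounds hi - lo (each iteration shrinks the interval, so it never runs out).
def bsearchAlt (park : List (List String)) (hgt wid : Nat) (empties : List (Int × Int)) :
    Nat → Nat → Nat → Nat
  | 0, lo, _hi => lo
  | fuel + 1, lo, hi =>
    if lo < hi then
      let mid := (lo + hi + 1) / 2
      if fitsAlt park hgt wid empties mid then bsearchAlt park hgt wid empties fuel mid hi
      else bsearchAlt park hgt wid empties fuel lo (mid - 1)
    else lo

def solution_alt (mats : List Int) (park : List (List String)) : Int :=
  let hgt := park.length
  let wid := (park.getD 0 []).length
  let cands := mats.filter (fun m => decide (1 ≤ m ∧ m ≤ min (hgt : Int) (wid : Int)))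
  if cands.isEmpty then -1
  else
    let empties := emptiesAlt park wid
    let bc := PySem.List.maxD cands (fun m => m) 0
    let maxside := bsearchAlt park hgt wid empties bc.toNat 0 bc.toNat
    PySem.List.maxD (cands.filter (fun m => decide (m ≤ (maxside : Int)))) (fun m => m) (-1)

-- ===== PRECONDITION & SPEC =====
-- Pre_ excludes exactly the inputs where Python A raises IndexError: an empty park
-- (park[0]) and parks with a row shorter than the first row (park[i][j] with j < width).
def Pre_solution (mats : List Int) (park : List (List String)) : Prop :=
  park ≠ [] ∧ ∀ row ∈ park, (park.headD []).length ≤ row.length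
instance (mats : List Int) (park : List (List String)) : Decidable (Pre_solution mats park) := by
  unfold Pre_solution; infer_instance

def pvWitness_solution : List Int × List (List String) := ([1, 3], [["-1", "0"], ["-1", "-1"]])

def Spec_solution (mats : List Int) (park : List (List String)) (out : Int) : Prop := out = solution_alt mats park
instance (mats : List Int) (park : List (List String)) (out : Int) : Decidable (Spec_solution mats park out) := by unfold Spec_solution; infer_instance

-- ===== CLAIM (what is proved, stated in full; the proofs are below) =====
def Claim_equal_solution : Prop := ∀ (mats : List Int) (park : List (List String)), Dom_solution mats park → Pre_solution mats park → Spec_solution mats park (solution mats park)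

-- ===== LEMMAS AND PROOFS =====

-- the cell test both programs perform, over Nat indices
def cellN (park : List (List String)) (a b : Nat) : Bool := (park.getD a []).getD b "" == "-1"

-- A's inner error counter, extracted verbatim
def errA (park : List (List String)) (i j L : Int) : Int :=
  (PySem.List.pyRange 0 L 1).foldl (fun error h =>
    (PySem.List.pyRange 0 L 1).foldl (fun error w =>
      if PySem.List.pyGetD (PySem.List.pyGetD park (i + h) []) (j + w) "" ≠ "-1"
      then error + 1 else error) error) 0

-- the multiset of lengths A's guarded triple loop feeds to `max`
def contribs (park : List (List String)) (ms : List Int) (height width : Int) : List Int :=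
  (PySem.List.pyRange 0 height 1).flatMap fun i =>
    (PySem.List.pyRange 0 width 1).flatMap fun j =>
      if PySem.List.pyGetD (PySem.List.pyGetD park i []) j "" = "-1" then
        ms.filter (fun length => decide ((length + i ≤ height ∧ length + j ≤ width) ∧ errA park i j length = 0))
      else []

-- an L×L block of "-1" cells placed inside the hgt×wid grid
def feasPlace (park : List (List String)) (hgt wid LN : Nat) : Prop :=
  ∃ a b : Nat, a + LN ≤ hgt ∧ b + LN ≤ wid ∧
    ∀ h w : Nat, h < LN → w < LN → cellN park (a + h) (b + w) = true

lemma foldA_eq (park : List (List String)) (ms : List Int) (height width : Int) :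
    (PySem.List.pyRange 0 height 1).foldl (fun answer i =>
      (PySem.List.pyRange 0 width 1).foldl (fun answer j =>
        if PySem.List.pyGetD (PySem.List.pyGetD park i []) j "" = "-1" then
          ms.foldl (fun answer length =>
            if length + i ≤ height ∧ length + j ≤ width then
              let error : Int :=
                (PySem.List.pyRange 0 length 1).foldl (fun error h =>
                  (PySem.List.pyRange 0 length 1).foldl (fun error w =>
                    if PySem.List.pyGetD (PySem.List.pyGetD park (i + h) []) (j + w) "" ≠ "-1"
                    then error + 1 else error) error) 0
              if error = 0 then max length answer else answer
            else answer) answer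
        else answer) answer) 0
    = (contribs park ms height width).foldl (fun a L => max L a) 0 := by
  unfold contribs
  rw [List.foldl_flatMap]
  apply PySem.List.foldl_congr_mem
  intro acc i _
  rw [List.foldl_flatMap]
  apply PySem.List.foldl_congr_mem
  intro acc2 j _
  by_cases hE : PySem.List.pyGetD (PySem.List.pyGetD park i []) j "" = "-1"
  · rw [if_pos hE, if_pos hE]
    have hstep : ∀ (a : Int), ∀ L ∈ ms,
        (fun answer length =>
          if length + i ≤ height ∧ length + j ≤ width then
            let error : Int :=
              (PySem.List.pyRange 0 length 1).foldl (fun error h =>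
                (PySem.List.pyRange 0 length 1).foldl (fun error w =>
                  if PySem.List.pyGetD (PySem.List.pyGetD park (i + h) []) (j + w) "" ≠ "-1"
                  then error + 1 else error) error) 0
            if error = 0 then max length answer else answer
          else answer) a L
        = (fun answer length =>
            if (length + i ≤ height ∧ length + j ≤ width) ∧ errA park i j length = 0
            then max length answer else answer) a L := by
      intro a L _
      simp only [errA]
      split_ifs with h1 h2 h3 h3 <;> first | rfl | (exact absurd ⟨h1, h2⟩ h3) | tauto
    rw [PySem.List.foldl_congr_mem ms _ _ acc2 (fun a L hL => hstep a L hL)]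
    exact PySem.List.foldl_ite_eq_foldl_filter _ _ ms acc2
  · rw [if_neg hE, if_neg hE]
    rfl

lemma solution_eq_maxfold (mats : List Int) (park : List (List String)) :
    solution mats park =
      (if (contribs park (PySem.List.sorted mats id true) (park.length : Int)
            ((park.getD 0 []).length : Int)).foldl (fun a L => max L a) 0 = 0 then -1
       else (contribs park (PySem.List.sorted mats id true) (park.length : Int)
            ((park.getD 0 []).length : Int)).foldl (fun a L => max L a) 0) := by
  unfold solution
  simp only [PySem.List.len_eq, PySem.List.pyGetD_zero]
  rw [foldA_eq]

lemma maxfold_nonneg_le (l : List Int) :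
    0 ≤ l.foldl (fun a L => max L a) 0 ∧ ∀ x ∈ l, x ≤ l.foldl (fun a L => max L a) 0 := by
  have h : l.foldl (fun a L => max L a) 0 = l.foldl max 0 :=
    PySem.List.foldl_congr_mem l (fun a L => max L a) max 0 (fun acc x _ => max_comm x acc)
  rw [h]
  exact ⟨(PySem.List.le_foldl_max l 0).1, (PySem.List.le_foldl_max l 0).2⟩

lemma maxfold_mem (l : List Int) (a : Int) :
    l.foldl (fun x L => max L x) a = a ∨ l.foldl (fun x L => max L x) a ∈ l := by
  induction l generalizing a with
  | nil => left; rfl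
  | cons x l ih =>
    simp only [List.foldl_cons]
    rcases ih (max x a) with h | h
    · rw [h]
      rcases max_choice x a with h' | h' <;> rw [h']
      · right; exact List.mem_cons_self
      · left; rfl
    · right; exact List.mem_cons_of_mem _ h

lemma errA_eq_zero_iff (park : List (List String)) (i j L : Int) :
    errA park i j L = 0 ↔ ∀ h w : Int, 0 ≤ h → h < L → 0 ≤ w → w < L →
      PySem.List.pyGetD (PySem.List.pyGetD park (i + h) []) (j + w) "" = "-1" := by
  unfold errA
  rw [PySem.List.foldl_congr_mem (PySem.List.pyRange 0 L 1) _
      (fun e h => e + ((PySem.List.pyRange 0 L 1).countP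
        (fun w => decide (PySem.List.pyGetD (PySem.List.pyGetD park (i + h) []) (j + w) "" ≠ "-1")) : Int)) 0
      (fun acc h _ => PySem.List.foldl_ite_add_one _ _ acc)]
  rw [PySem.List.foldl_add, zero_add]
  rw [show (List.map
        (fun h => ((List.countP (fun w => decide (PySem.List.pyGetD (PySem.List.pyGetD park (i + h) []) (j + w) "" ≠ "-1"))
            (PySem.List.pyRange 0 L 1) : Nat) : Int))
        (PySem.List.pyRange 0 L 1)) =
      List.map Nat.cast ((PySem.List.pyRange 0 L 1).map
        (fun h => List.countP (fun w => decide (PySem.List.pyGetD (PySem.List.pyGetD park (i + h) []) (j + w) "" ≠ "-1"))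
            (PySem.List.pyRange 0 L 1))) from by rw [List.map_map]; rfl]
  rw [← Nat.cast_list_sum, Int.natCast_eq_zero, List.sum_eq_zero_iff]
  constructor
  · intro hall h w h0 hL w0 wL
    have hmem : h ∈ PySem.List.pyRange 0 L 1 := (PySem.List.mem_pyRange_one).mpr ⟨h0, hL⟩
    have := hall _ (List.mem_map_of_mem hmem)
    rw [List.countP_eq_zero] at this
    have := this w ((PySem.List.mem_pyRange_one).mpr ⟨w0, wL⟩)
    simpa using this
  · intro hall x hx
    rcases List.mem_map.mp hx with ⟨h, hh, rfl⟩
    rw [List.countP_eq_zero]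
    intro w hw
    rcases (PySem.List.mem_pyRange_one).mp hh with ⟨h0, hL⟩
    rcases (PySem.List.mem_pyRange_one).mp hw with ⟨w0, wL⟩
    simpa using hall h w h0 hL w0 wL

lemma contribs_mem_iff (park : List (List String)) (ms : List Int) (H W : Nat) (L : Int) :
    L ∈ contribs park ms (H : Int) (W : Int) ↔
      ∃ i j : Int, (0 ≤ i ∧ i < (H : Int)) ∧ (0 ≤ j ∧ j < (W : Int)) ∧
        PySem.List.pyGetD (PySem.List.pyGetD park i []) j "" = "-1" ∧
        L ∈ ms ∧ (L + i ≤ (H : Int) ∧ L + j ≤ (W : Int)) ∧ errA park i j L = 0 := by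
  unfold contribs
  simp only [List.mem_flatMap, PySem.List.mem_pyRange_one]
  constructor
  · rintro ⟨i, hi, j, hj, hmem⟩
    split_ifs at hmem with hE
    · rcases List.mem_filter.mp hmem with ⟨hms, hcond⟩
      rw [decide_eq_true_eq] at hcond
      exact ⟨i, j, hi, hj, hE, hms, hcond.1, hcond.2⟩
    · simp at hmem
  · rintro ⟨i, j, hi, hj, hE, hms, hb, he⟩
    refine ⟨i, hi, j, hj, ?_⟩
    rw [if_pos hE]
    exact List.mem_filter.mpr ⟨hms, by rw [decide_eq_true_eq]; exact ⟨hb, he⟩⟩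

lemma cell_bridge (park : List (List String)) (a b : Nat) :
    PySem.List.pyGetD (PySem.List.pyGetD park (a : Int) []) (b : Int) "" = "-1" ↔
      cellN park a b = true := by
  simp [cellN, PySem.List.pyGetD_natCast]

lemma pos_contrib_iff (park : List (List String)) (H W : Nat) (L : Int) (hL : 1 ≤ L) :
    (∃ i j : Int, (0 ≤ i ∧ i < (H : Int)) ∧ (0 ≤ j ∧ j < (W : Int)) ∧
        PySem.List.pyGetD (PySem.List.pyGetD park i []) j "" = "-1" ∧
        (L + i ≤ (H : Int) ∧ L + j ≤ (W : Int)) ∧ errA park i j L = 0) ↔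
      (L ≤ (H : Int) ∧ L ≤ (W : Int) ∧ feasPlace park H W L.toNat) := by
  constructor
  · rintro ⟨i, j, ⟨hi0, hiH⟩, ⟨hj0, hjW⟩, _hE, ⟨hbH, hbW⟩, herr⟩
    refine ⟨by omega, by omega, i.toNat, j.toNat, by omega, by omega, ?_⟩
    intro h w hh hw
    rw [← cell_bridge]
    have := (errA_eq_zero_iff park i j L).mp herr (h : Int) (w : Int)
      (by omega) (by omega) (by omega) (by omega)
    have hi : ((i.toNat + h : Nat) : Int) = i + (h : Int) := by omega
    have hj : ((j.toNat + w : Nat) : Int) = j + (w : Int) := by omega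
    rw [hi, hj]
    exact this
  · rintro ⟨hLH, hLW, a, b, ha, hb, hcells⟩
    have hLN : 1 ≤ L.toNat := by omega
    refine ⟨(a : Int), (b : Int), ⟨by omega, by omega⟩, ⟨by omega, by omega⟩, ?_, ⟨by omega, by omega⟩, ?_⟩
    · have := hcells 0 0 (by omega) (by omega)
      rw [← cell_bridge] at this
      simpa using this
    · rw [errA_eq_zero_iff]
      intro h w h0 hLh w0 hLw
      have h1 : (a : Int) + h = ((a + h.toNat : Nat) : Int) := by omega
      have h2 : (b : Int) + w = ((b + w.toNat : Nat) : Int) := by omega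
      rw [h1, h2, cell_bridge]
      exact hcells h.toNat w.toNat (by omega) (by omega)

lemma emptiesAlt_sound (park : List (List String)) (wid : Nat) (p : Int × Int)
    (hp : p ∈ emptiesAlt park wid) :
    ∃ a b : Nat, p = ((a : Int), (b : Int)) ∧ a < park.length ∧ b < wid ∧
      cellN park a b = true := by
  unfold emptiesAlt at hp
  rw [List.mem_flatMap] at hp
  obtain ⟨iv, hiv, hp⟩ := hp
  rw [List.mem_map] at hp
  obtain ⟨jv, hjv, rfl⟩ := hp
  rw [List.mem_filter] at hjv
  obtain ⟨hjv, hval⟩ := hjv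
  rw [PySem.List.mem_enumerate_iff] at hiv
  obtain ⟨a, ha, rfl⟩ := hiv
  rw [PySem.List.slice_to_natCast, PySem.List.mem_enumerate_iff] at hjv
  obtain ⟨b, hb, rfl⟩ := hjv
  refine ⟨a, b, by simp, ha, ?_, ?_⟩
  · have := hb
    simp [List.length_take] at this
    omega
  · have hb' : b < park[a].length := by
      have := hb; simp [List.length_take] at this; omega
    unfold cellN
    rw [List.getD_eq_getElem park [] ha, List.getD_eq_getElem park[a] "" hb']
    simpa [List.getElem_take] using hval

lemma emptiesAlt_complete (park : List (List String)) (wid : Nat) (a b : Nat)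
    (ha : a < park.length) (hb : b < wid) (hc : cellN park a b = true) :
    ((a : Int), (b : Int)) ∈ emptiesAlt park wid := by
  unfold cellN at hc
  rw [List.getD_eq_getElem park [] ha] at hc
  have hb' : b < park[a].length := by
    by_contra hge
    rw [List.getD_eq_getElem?_getD, List.getElem?_eq_none (by omega)] at hc
    simp at hc
  rw [List.getD_eq_getElem park[a] "" hb'] at hc
  unfold emptiesAlt
  rw [List.mem_flatMap]
  refine ⟨((a : Int), park[a]), ?_, ?_⟩
  · rw [PySem.List.mem_enumerate_iff]
    exact ⟨a, ha, by simp⟩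
  · rw [List.mem_map]
    refine ⟨((b : Int), park[a][b]), ?_, by simp⟩
    rw [List.mem_filter, PySem.List.slice_to_natCast, PySem.List.mem_enumerate_iff]
    constructor
    · refine ⟨b, by simp [List.length_take]; omega, ?_⟩
      simp [List.getElem_take]
    · simpa using hc

lemma fitsAlt_iff (park : List (List String)) (wid : Nat) (s : Nat) (hs : 1 ≤ s) :
    fitsAlt park park.length wid (emptiesAlt park wid) s = true ↔
      feasPlace park park.length wid s := by
  unfold fitsAlt feasPlace
  simp only [List.any_eq_true, List.all_eq_true, List.mem_range, Bool.and_eq_true,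
    decide_eq_true_eq, beq_iff_eq]
  constructor
  · rintro ⟨p, hmem, ⟨ha, hb⟩, hc⟩
    obtain ⟨a, b, rfl, haL, hbL, -⟩ := emptiesAlt_sound park wid p hmem
    refine ⟨a, b, by omega, by omega, ?_⟩
    intro h w hh hw
    rw [← cell_bridge]
    have := hc h hh w hw
    have e1 : ((a : Int) + (h : Int)) = ((a + h : Nat) : Int) := by omega
    have e2 : ((b : Int) + (w : Int)) = ((b + w : Nat) : Int) := by omega
    rw [e1, e2] at this
    exact this
  · rintro ⟨a, b, ha, hb, hc⟩
    have hcell : cellN park a b = true := by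
      have := hc 0 0 (by omega) (by omega)
      simpa using this
    refine ⟨((a : Int), (b : Int)),
      emptiesAlt_complete park wid a b (by omega) (by omega) hcell,
      ⟨by omega, by omega⟩, ?_⟩
    intro h hh w hw
    have e1 : ((a : Int) + (h : Int)) = ((a + h : Nat) : Int) := by omega
    have e2 : ((b : Int) + (w : Int)) = ((b + w : Nat) : Int) := by omega
    rw [e1, e2]
    have := hc h w hh hw
    rw [← cell_bridge] at this
    exact this

lemma feas_mono (park : List (List String)) (hgt wid : Nat) {s t : Nat}
    (h : feasPlace park hgt wid t) (hst : s ≤ t) : feasPlace park hgt wid s := by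
  rcases h with ⟨a, b, ha, hb, hc⟩
  exact ⟨a, b, by omega, by omega, fun h w hh hw => hc h w (by omega) (by omega)⟩

lemma bsearch_spec (park : List (List String)) (hgt wid : Nat) (empties : List (Int × Int))
    (mn : Nat) :
    ∀ fuel lo hi, hi - lo ≤ fuel → lo ≤ hi → hi ≤ mn →
      (lo = 0 ∨ fitsAlt park hgt wid empties lo = true) →
      (hi = mn ∨ fitsAlt park hgt wid empties (hi + 1) = false) →
      lo ≤ bsearchAlt park hgt wid empties fuel lo hi ∧
      bsearchAlt park hgt wid empties fuel lo hi ≤ hi ∧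
      (bsearchAlt park hgt wid empties fuel lo hi = 0 ∨
        fitsAlt park hgt wid empties (bsearchAlt park hgt wid empties fuel lo hi) = true) ∧
      (bsearchAlt park hgt wid empties fuel lo hi = mn ∨
        fitsAlt park hgt wid empties (bsearchAlt park hgt wid empties fuel lo hi + 1) = false) := by
  intro fuel
  induction fuel with
  | zero =>
    intro lo hi hd hle hmn hlo hhi
    have heq : lo = hi := by omega
    simp only [bsearchAlt]
    exact ⟨le_refl lo, hle, hlo, by rw [heq]; exact hhi⟩
  | succ fuel ih =>
    intro lo hi hd hle hmn hlo hhi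
    rw [bsearchAlt]
    by_cases h : lo < hi
    · rw [if_pos h]
      simp only
      by_cases hf : fitsAlt park hgt wid empties ((lo + hi + 1) / 2) = true
      · rw [if_pos hf]
        have hrec := ih ((lo + hi + 1) / 2) hi (by omega) (by omega) hmn (Or.inr hf) hhi
        exact ⟨by omega, hrec.2.1, hrec.2.2⟩
      · rw [if_neg hf]
        have hf' : fitsAlt park hgt wid empties ((lo + hi + 1) / 2) = false :=
          Bool.eq_false_iff.mpr hf
        have hstep : (lo + hi + 1) / 2 - 1 + 1 = (lo + hi + 1) / 2 := by omega
        have hrec := ih lo ((lo + hi + 1) / 2 - 1) (by omega) (by omega) (by omega) hlo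
          (Or.inr (by rw [hstep]; exact hf'))
        exact ⟨hrec.1, by omega, hrec.2.2⟩
    · rw [if_neg h]
      have heq : lo = hi := by omega
      exact ⟨le_refl lo, by omega, hlo, by rw [heq]; exact hhi⟩

lemma main_eq (mats : List Int) (park : List (List String)) :
    solution mats park = solution_alt mats park := by
  rw [solution_eq_maxfold]
  unfold solution_alt
  simp only []
  set H := park.length with hH
  set W := (park.getD 0 []).length with hW
  set fcands := mats.filter (fun m => decide (1 ≤ m ∧ m ≤ min (H : Int) (W : Int))) with hfc
  set cl := contribs park (PySem.List.sorted mats id true) (H : Int) (W : Int) with hcl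
  set ans := cl.foldl (fun a L => max L a) 0 with hans
  have hans0 : 0 ≤ ans := (maxfold_nonneg_le cl).1
  have hansle : ∀ x ∈ cl, x ≤ ans := (maxfold_nonneg_le cl).2
  have hansmem : ans = 0 ∨ ans ∈ cl := maxfold_mem cl 0
  -- membership in cl for positive lengths
  have hclpos : ∀ L : Int, 1 ≤ L →
      (L ∈ cl ↔ (L ∈ mats ∧ L ≤ (H : Int) ∧ L ≤ (W : Int) ∧ feasPlace park H W L.toNat)) := by
    intro L hL
    rw [hcl, contribs_mem_iff]
    constructor
    · rintro ⟨i, j, hi, hj, hE, hms, hb, he⟩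
      have := (pos_contrib_iff park H W L hL).mp ⟨i, j, hi, hj, hE, hb, he⟩
      exact ⟨(PySem.List.mem_sorted mats id true L).mp hms, this.1, this.2.1, this.2.2⟩
    · rintro ⟨hms, h1, h2, h3⟩
      rcases (pos_contrib_iff park H W L hL).mpr ⟨h1, h2, h3⟩ with ⟨i, j, hi, hj, hE, hb, he⟩
      exact ⟨i, j, hi, hj, hE, (PySem.List.mem_sorted mats id true L).mpr hms, hb, he⟩
  have hmemfc : ∀ L : Int, L ∈ fcands ↔
      (L ∈ mats ∧ 1 ≤ L ∧ L ≤ (H : Int) ∧ L ≤ (W : Int)) := by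
    intro L
    rw [hfc, List.mem_filter, decide_eq_true_eq, le_min_iff]
  by_cases hempty : fcands.isEmpty
  · rw [if_pos hempty]
    rw [List.isEmpty_iff] at hempty
    have hans_eq : ans = 0 := by
      rcases hansmem with h | h
      · exact h
      · by_cases hans1 : 1 ≤ ans
        · rcases (hclpos ans hans1).mp h with ⟨hm, hH', hW', -⟩
          have : ans ∈ fcands := (hmemfc ans).mpr ⟨hm, hans1, hH', hW'⟩
          rw [hempty] at this
          simp at this
        · omega
    rw [if_pos hans_eq]
  · rw [if_neg hempty]
    rw [List.isEmpty_iff] at hempty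
    set bc := PySem.List.maxD fcands (fun m => m) 0 with hbc
    set r := bsearchAlt park H W (emptiesAlt park W) bc.toNat 0 bc.toNat with hr
    set flt := fcands.filter (fun m => decide (m ≤ (r : Int))) with hflt
    have hbcmem : bc ∈ fcands := PySem.List.maxD_mem fcands _ _ hempty
    rcases (hmemfc bc).mp hbcmem with ⟨hbcin, hbc1, hbcH, hbcW⟩
    have hbcmax : ∀ y ∈ fcands, y ≤ bc := fun y hy => PySem.List.le_maxD_id fcands 0 y hy
    -- the binary search result
    have hbs := bsearch_spec park H W (emptiesAlt park W) bc.toNat bc.toNat 0 bc.toNat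
      (by omega) (by omega) (le_refl _) (Or.inl rfl) (Or.inl rfl)
    rw [← hr] at hbs
    obtain ⟨-, hrle, hrfit, hrtop⟩ := hbs
    -- feasibility of a positive in-range length is exactly "≤ r"
    have hfeas_iff : ∀ L : Int, 1 ≤ L → L ≤ bc →
        ((L ≤ (H : Int) ∧ L ≤ (W : Int) ∧ feasPlace park H W L.toNat) ↔ L ≤ (r : Int)) := by
      intro L hL hLbc
      constructor
      · rintro ⟨h1, h2, h3⟩
        by_contra hgt'
        rcases hrtop with htop | hfalse
        · omega
        · have : fitsAlt park H W (emptiesAlt park W) (r + 1) = true := by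
            rw [hH, fitsAlt_iff park W (r + 1) (by omega)]
            rw [← hH]
            exact feas_mono park H W h3 (by omega)
          rw [this] at hfalse
          simp at hfalse
      · intro hLr
        refine ⟨by omega, by omega, ?_⟩
        have hr1 : 1 ≤ r := by omega
        rcases hrfit with hr0 | hfit
        · omega
        · have hfeasr : feasPlace park H W r := by
            rw [hH] at hfit ⊢
            exact (fitsAlt_iff park W r hr1).mp hfit
          exact feas_mono park H W hfeasr (by omega)
    have hmemflt : ∀ L : Int, L ∈ flt ↔ (L ∈ fcands ∧ L ≤ (r : Int)) := by
      intro L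
      rw [hflt, List.mem_filter, decide_eq_true_eq]
    -- positive members of cl are exactly the members of flt
    have hclflt : ∀ L : Int, 1 ≤ L → (L ∈ cl ↔ L ∈ flt) := by
      intro L hL
      rw [hclpos L hL, hmemflt L, hmemfc L]
      constructor
      · rintro ⟨hm, h1, h2, h3⟩
        have hLbc : L ≤ bc := hbcmax L ((hmemfc L).mpr ⟨hm, hL, h1, h2⟩)
        exact ⟨⟨hm, hL, h1, h2⟩, (hfeas_iff L hL hLbc).mp ⟨h1, h2, h3⟩⟩
      · rintro ⟨⟨hm, h1, h2, h3⟩, hLr⟩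
        have hLbc : L ≤ bc := by omega
        have := (hfeas_iff L hL hLbc).mpr hLr
        exact ⟨hm, h2, h3, this.2.2⟩
    by_cases hne : flt = []
    · -- no usable mat: A's answer is 0, B returns the default -1
      have hans_eq : ans = 0 := by
        rcases hansmem with h | h
        · exact h
        · by_cases hans1 : 1 ≤ ans
          · have : ans ∈ flt := (hclflt ans hans1).mp h
            rw [hne] at this
            simp at this
          · omega
      rw [if_pos hans_eq, hne, PySem.List.maxD_nil]
    · set m := PySem.List.maxD flt (fun m => m) (-1) with hm
      have hmmem : m ∈ flt := PySem.List.maxD_mem flt _ _ hne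
      rcases (hmemflt m).mp hmmem with ⟨hmfc, hmr⟩
      have hm1 : 1 ≤ m := ((hmemfc m).mp hmfc).2.1
      have hmcl : m ∈ cl := (hclflt m hm1).mpr hmmem
      have hle1 : m ≤ ans := hansle _ hmcl
      have hansne : ans ≠ 0 := by omega
      have hans1 : 1 ≤ ans := by omega
      have hanscl : ans ∈ cl := by
        rcases hansmem with h | h
        · exact absurd h hansne
        · exact h
      have hansflt : ans ∈ flt := (hclflt ans hans1).mp hanscl
      have hle2 : ans ≤ m := PySem.List.le_maxD_id flt (-1) ans hansflt
      rw [if_neg hansne]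
      omega

-- ===== VERDICT (by name: the statement is the Claim_ definition above) =====
theorem solution_spec : Claim_equal_solution := by
  intro mats park _ _
  unfold Spec_solution
  exact main_eq mats park
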